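-- pv_equiv track=rewrite | github.com/alexisjohann/ALPLASTBK | scripts/bulk_paper_ingestion.py | merge_papers
-- ===== SOURCE A (Python) =====
-- def merge_papers(papers_list: list[list[dict]]) -> list[dict]:
--     """Merge papers from multiple sources, removing duplicates."""
--     seen_titles = {}
--     merged = []
--
--     for papers in papers_list:
--         for paper in papers:
--             title_key = paper.get('title', '').lower()[:50]
--
--             if title_key not in seen_titles:
--                 seen_titles[title_key] = paper
--                 merged.append(paper)
--             else:
--                 # Update with better data if available
--                 existing = seen_titles[title_key]
--                 if paper.get('doi') and not existing.get('doi'):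
--                     existing['doi'] = paper['doi']
--                 if paper.get('journal') and not existing.get('journal'):
--                     existing['journal'] = paper['journal']
--
--     return merged
-- ===== SOURCE B (Python) =====
-- def merge_papers(papers_list: list[list[dict]]) -> list[dict]:
--     """Merge papers from multiple sources, removing duplicates (two-pass)."""
--     # Pass 1: first-seen paper per title key, in first-appearance order.
--     by_key = {}
--     for papers in papers_list:
--         for paper in papers:
--             k = paper.get('title', '').lower()[:50]
--             if k not in by_key:
--                 by_key[k] = paper
--     # Pass 2: enrich each first-seen paper with the first non-empty doi/journal.
--     for papers in papers_list:
--         for paper in papers: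
--             k = paper.get('title', '').lower()[:50]
--             existing = by_key[k]
--             if paper.get('doi') and not existing.get('doi'):
--                 existing['doi'] = paper['doi']
--             if paper.get('journal') and not existing.get('journal'):
--                 existing['journal'] = paper['journal']
--     return list(by_key.values())
-- ===== Notes on version B (the rewrite author's own statement) =====
-- stated objective: alternative
-- what changed: Replaces A's single interleaved dedupe-and-enrich loop (which maintains a separate merged list alongside the seen_titles dict) with two separate passes: one pass that only records the first paper per title key, then one pass that only back-fills missing doi/journal fields, returning the dict's values.
import Mathlib
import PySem

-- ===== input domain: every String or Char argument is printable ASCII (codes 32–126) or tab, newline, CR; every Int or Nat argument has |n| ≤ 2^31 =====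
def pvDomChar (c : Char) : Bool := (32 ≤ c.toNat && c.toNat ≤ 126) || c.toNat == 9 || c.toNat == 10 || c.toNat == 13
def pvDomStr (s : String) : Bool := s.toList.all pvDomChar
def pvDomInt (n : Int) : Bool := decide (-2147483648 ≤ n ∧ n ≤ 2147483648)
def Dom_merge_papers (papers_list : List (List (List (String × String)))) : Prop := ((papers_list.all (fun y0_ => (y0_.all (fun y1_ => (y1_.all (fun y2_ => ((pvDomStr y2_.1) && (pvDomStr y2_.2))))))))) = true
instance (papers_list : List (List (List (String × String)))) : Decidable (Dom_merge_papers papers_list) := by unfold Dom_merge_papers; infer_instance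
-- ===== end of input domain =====

-- B replaces A's single interleaved dedupe-and-enrich loop (dict + separate merged list)
-- with two separate passes (first-seen dict, then a back-fill pass), returning the dict's
-- values; same return value. Both Pythons mutate the input paper dicts in place in the same
-- way; the equivalence proved here is about the return value (aliasing of the mutated papers
-- is modelled by resolving merged entries through the seen-titles dict at the end).

-- ===== PORT A =====
-- title_key = paper.get('title', '').lower()[:50]   (identical line in both Pythons)
def pvKey (paper : PySem.Dict String String) : String :=
  PySem.Str.slice (PySem.Str.lower (PySem.Dict.getD paper "title" "")) none (some 50)

-- the two 'update with better data' statements (identical lines in both Pythons);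
-- truthiness of paper.get(f): the value exists and is non-empty ⟷ getD f "" ≠ ""
def pvEnrich (existing paper : PySem.Dict String String) : PySem.Dict String String :=
  let e1 := if PySem.Dict.getD paper "doi" "" ≠ "" ∧ PySem.Dict.getD existing "doi" "" = ""
    then PySem.Dict.insert existing "doi" (PySem.Dict.getD paper "doi" "") else existing
  if PySem.Dict.getD paper "journal" "" ≠ "" ∧ PySem.Dict.getD e1 "journal" "" = ""
    then PySem.Dict.insert e1 "journal" (PySem.Dict.getD paper "journal" "") else e1

-- A's loop body; merged holds aliases of the (mutated) stored papers, so it is carried as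
-- the list of their title keys and resolved through seen_titles at the end.
def pvStepA (st : PySem.Dict String (PySem.Dict String String) × List String)
    (paper : PySem.Dict String String) :
    PySem.Dict String (PySem.Dict String String) × List String :=
  let key := pvKey paper
  if PySem.Dict.contains st.1 key then
    (PySem.Dict.modify st.1 key PySem.Dict.empty (fun existing => pvEnrich existing paper), st.2)
  else
    (PySem.Dict.insert st.1 key paper, st.2 ++ [key])

def merge_papers (papers_list : List (List (List (String × String)))) : List (List (String × String)) :=
  let st := papers_list.foldl
    (fun st papers => papers.foldl (fun st paper => pvStepA st (PySem.Dict.mk paper)) st)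
    (PySem.Dict.empty, [])
  st.2.map (fun k => (PySem.Dict.getD st.1 k PySem.Dict.empty).items)

-- ===== PORT B =====
-- pass 1 body: record the first paper seen for each key
def pvIns (d : PySem.Dict String (PySem.Dict String String))
    (paper : PySem.Dict String String) : PySem.Dict String (PySem.Dict String String) :=
  if PySem.Dict.contains d (pvKey paper) then d else PySem.Dict.insert d (pvKey paper) paper

-- pass 2 body: by_key[k] is mutated in place; ported as modify (KeyError is impossible:
-- pass 1 has inserted every paper's key, so the default is never consulted)
def pvUpd (d : PySem.Dict String (PySem.Dict String String))
    (paper : PySem.Dict String String) : PySem.Dict String (PySem.Dict String String) :=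
  PySem.Dict.modify d (pvKey paper) PySem.Dict.empty (fun existing => pvEnrich existing paper)

def merge_papers_alt (papers_list : List (List (List (String × String)))) : List (List (String × String)) :=
  let byKey := papers_list.foldl
    (fun d papers => papers.foldl (fun d paper => pvIns d (PySem.Dict.mk paper)) d)
    PySem.Dict.empty
  let byKey := papers_list.foldl
    (fun d papers => papers.foldl (fun d paper => pvUpd d (PySem.Dict.mk paper)) d)
    byKey
  byKey.values.map PySem.Dict.items

-- ===== PRECONDITION & SPEC =====
def Spec_merge_papers (papers_list : List (List (List (String × String)))) (out : List (List (String × String))) : Prop := out = merge_papers_alt papers_list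
instance (papers_list : List (List (List (String × String)))) (out : List (List (String × String))) : Decidable (Spec_merge_papers papers_list out) := by unfold Spec_merge_papers; infer_instance

-- ===== CLAIM (what is proved, stated in full; the proofs are below) =====
def Claim_equal_merge_papers : Prop := ∀ (papers_list : List (List (List (String × String)))), Dom_merge_papers papers_list → Spec_merge_papers papers_list (merge_papers papers_list)

-- ===== LEMMAS AND PROOFS =====

-- enriching a paper with itself changes nothing
theorem pvEnrich_self (p : PySem.Dict String String) : pvEnrich p p = p := by
  simp only [pvEnrich]
  have hi : (if PySem.Dict.getD p "doi" "" ≠ "" ∧ PySem.Dict.getD p "doi" "" = ""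
      then PySem.Dict.insert p "doi" (PySem.Dict.getD p "doi" "") else p) = p :=
    if_neg (fun h => h.1 h.2)
  rw [hi]
  exact if_neg (fun h => h.1 h.2)

-- A's loop body equals "insert-if-new, then back-fill" on the dict component
theorem pvStepA_fst (st : PySem.Dict String (PySem.Dict String String) × List String)
    (p : PySem.Dict String String) : (pvStepA st p).1 = pvUpd (pvIns st.1 p) p := by
  by_cases h : PySem.Dict.contains st.1 (pvKey p)
  · simp [pvStepA, pvIns, pvUpd, h]
  · simp only [pvStepA, pvIns, pvUpd, h, Bool.false_eq_true, ↓reduceIte]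
    rw [PySem.Dict.modify, PySem.Dict.getD_insert_self, pvEnrich_self,
      PySem.Dict.insert_insert_self]

-- inserting a fresh key commutes with overwriting a present (distinct) key
theorem pvInsert_comm (d : PySem.Dict String (PySem.Dict String String))
    (kp kq : String) (e q : PySem.Dict String String)
    (hp : PySem.Dict.contains d kp = true) (hq : PySem.Dict.contains d kq = false) :
    PySem.Dict.insert (PySem.Dict.insert d kp e) kq q
      = PySem.Dict.insert (PySem.Dict.insert d kq q) kp e := by
  have hne : kq ≠ kp := by rintro rfl; rw [hp] at hq; exact Bool.true_eq_false.mp hq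
  apply PySem.Dict.ext
  have h1 : PySem.Dict.contains (PySem.Dict.insert d kp e) kq = false := by
    rw [PySem.Dict.contains_insert]
    simp [hne, hq]
  have h2 : PySem.Dict.contains (PySem.Dict.insert d kq q) kp = true := by
    rw [PySem.Dict.contains_insert, hp]
    simp
  rw [PySem.Dict.items_insert_of_not_contains _ _ h1,
    PySem.Dict.items_insert_of_contains _ _ hp,
    PySem.Dict.items_insert_of_contains _ _ h2,
    PySem.Dict.items_insert_of_not_contains _ _ hq]
  simp [hne]

-- pass-1 step for a later paper commutes with the pass-2 step for an already-inserted paper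
theorem pvIns_pvUpd_comm (d : PySem.Dict String (PySem.Dict String String))
    (p q : PySem.Dict String String) (hp : PySem.Dict.contains d (pvKey p) = true) :
    pvIns (pvUpd d p) q = pvUpd (pvIns d q) p := by
  by_cases hq : PySem.Dict.contains d (pvKey q)
  · have hc : PySem.Dict.contains (pvUpd d p) (pvKey q) = true := by
      unfold pvUpd
      rw [PySem.Dict.contains_modify, hq]
      simp
    simp only [pvIns, hc, hq, ↓reduceIte]
  · have hqf : PySem.Dict.contains d (pvKey q) = false := by
      simpa using hq
    have hne : pvKey p ≠ pvKey q := by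
      rintro h; rw [← h, hp] at hqf; exact Bool.true_eq_false.mp hqf
    have h1 : PySem.Dict.contains
        (PySem.Dict.insert d (pvKey p) (pvEnrich (PySem.Dict.getD d (pvKey p) PySem.Dict.empty) p))
        (pvKey q) = false := by
      rw [PySem.Dict.contains_insert]
      simp [hne.symm, hqf]
    simp only [pvIns, pvUpd, PySem.Dict.modify, h1, hqf, Bool.false_eq_true, ↓reduceIte]
    rw [PySem.Dict.getD_insert_of_ne _ _ _ hne,
      pvInsert_comm d (pvKey p) (pvKey q) _ q hp hqf]

-- pvIns only grows the key set
theorem contains_pvIns (d : PySem.Dict String (PySem.Dict String String))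
    (q : PySem.Dict String String) (k : String) (h : PySem.Dict.contains d k = true) :
    PySem.Dict.contains (pvIns d q) k = true := by
  by_cases hc : PySem.Dict.contains d (pvKey q)
  · simp only [pvIns, hc, ↓reduceIte]; exact h
  · simp only [pvIns, hc, Bool.false_eq_true, ↓reduceIte]
    rw [PySem.Dict.contains_insert, h]; simp

-- a pass-2 step for an already-inserted paper moves across a whole pass-1 fold
theorem foldl_pvIns_pvUpd (t : List (PySem.Dict String String))
    (d : PySem.Dict String (PySem.Dict String String)) (p : PySem.Dict String String)
    (hp : PySem.Dict.contains d (pvKey p) = true) :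
    t.foldl pvIns (pvUpd d p) = pvUpd (t.foldl pvIns d) p := by
  induction t generalizing d with
  | nil => rfl
  | cons q ts ih =>
    simp only [List.foldl_cons]
    rw [pvIns_pvUpd_comm d p q hp, ih _ (contains_pvIns d q _ hp)]

-- the interleaved fold equals pass 1 followed by pass 2
theorem foldl_step_eq_two_pass (L : List (PySem.Dict String String))
    (d : PySem.Dict String (PySem.Dict String String)) :
    L.foldl (fun d p => pvUpd (pvIns d p) p) d = L.foldl pvUpd (L.foldl pvIns d) := by
  induction L generalizing d with
  | nil => rfl
  | cons p t ih =>
    simp only [List.foldl_cons]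
    rw [ih]
    have hp : PySem.Dict.contains (pvIns d p) (pvKey p) = true := by
      by_cases hc : PySem.Dict.contains d (pvKey p)
      · simp only [pvIns, hc, ↓reduceIte]
      · simp only [pvIns, hc, Bool.false_eq_true, ↓reduceIte]
        exact PySem.Dict.contains_insert_self _ _ _
    rw [foldl_pvIns_pvUpd t (pvIns d p) p hp]

-- the dict component of A's fold is the interleaved fold
theorem foldl_pvStepA_fst (L : List (PySem.Dict String String))
    (st : PySem.Dict String (PySem.Dict String String) × List String) :
    (L.foldl pvStepA st).1 = L.foldl (fun d p => pvUpd (pvIns d p) p) st.1 := by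
  induction L generalizing st with
  | nil => rfl
  | cons p t ih =>
    simp only [List.foldl_cons]
    rw [ih, pvStepA_fst]

-- A's merged list is exactly the keys of seen_titles, in insertion order
theorem foldl_pvStepA_snd (L : List (PySem.Dict String String))
    (st : PySem.Dict String (PySem.Dict String String) × List String)
    (h : st.2 = st.1.keys) : (L.foldl pvStepA st).2 = (L.foldl pvStepA st).1.keys := by
  induction L generalizing st with
  | nil => exact h
  | cons p t ih =>
    simp only [List.foldl_cons]
    apply ih
    by_cases hc : PySem.Dict.contains st.1 (pvKey p)
    · simp only [pvStepA, hc, ↓reduceIte]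
      rw [PySem.Dict.keys_modify, PySem.Dict.keys_insert_of_contains _ _ hc, h]
    · simp only [pvStepA, hc, Bool.false_eq_true, ↓reduceIte]
      rw [PySem.Dict.keys_insert_of_not_contains _ _ (by simpa using hc), h]

-- keys stay Nodup through the interleaved fold
theorem nodup_keys_foldl_step (L : List (PySem.Dict String String))
    (d : PySem.Dict String (PySem.Dict String String)) (h : d.keys.Nodup) :
    (L.foldl (fun d p => pvUpd (pvIns d p) p) d).keys.Nodup := by
  induction L generalizing d with
  | nil => exact h
  | cons p t ih =>
    simp only [List.foldl_cons]
    apply ih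
    by_cases hc : PySem.Dict.contains d (pvKey p)
    · simp only [pvUpd, PySem.Dict.modify, pvIns, hc, ↓reduceIte]
      exact PySem.Dict.nodup_keys_insert _ _ _ h
    · simp only [pvUpd, PySem.Dict.modify, pvIns, hc, Bool.false_eq_true, ↓reduceIte]
      exact PySem.Dict.nodup_keys_insert _ _ _ (PySem.Dict.nodup_keys_insert _ _ _ h)

-- ===== VERDICT (by name: the statement is the Claim_ definition above) =====
theorem merge_papers_spec : Claim_equal_merge_papers := by
  intro papers_list _
  simp only [Spec_merge_papers, merge_papers, merge_papers_alt]
  -- rewrite both nested folds as folds over the flattened, Dict-coerced paper stream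
  have hA : papers_list.foldl
      (fun st papers => papers.foldl (fun st paper => pvStepA st (PySem.Dict.mk paper)) st)
      (PySem.Dict.empty, []) =
      ((papers_list.flatten.map PySem.Dict.mk).foldl pvStepA (PySem.Dict.empty, [])) := by
    rw [List.foldl_map, List.foldl_flatten]
  have hB1 : papers_list.foldl
      (fun d papers => papers.foldl (fun d paper => pvIns d (PySem.Dict.mk paper)) d)
      PySem.Dict.empty =
      ((papers_list.flatten.map PySem.Dict.mk).foldl pvIns PySem.Dict.empty) := by
    rw [List.foldl_map, List.foldl_flatten]
  have hB2 : ∀ d0, papers_list.foldl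
      (fun d papers => papers.foldl (fun d paper => pvUpd d (PySem.Dict.mk paper)) d) d0 =
      ((papers_list.flatten.map PySem.Dict.mk).foldl pvUpd d0) := by
    intro d0
    rw [List.foldl_map, List.foldl_flatten]
  rw [hA, hB1, hB2]
  set L := papers_list.flatten.map PySem.Dict.mk with hL
  set dB := L.foldl pvUpd (L.foldl pvIns PySem.Dict.empty) with hdB
  have hfst : (L.foldl pvStepA (PySem.Dict.empty, ([] : List String))).1 = dB := by
    rw [foldl_pvStepA_fst, foldl_step_eq_two_pass]
  have hsnd : (L.foldl pvStepA (PySem.Dict.empty, ([] : List String))).2 = dB.keys := by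
    rw [foldl_pvStepA_snd L _ (by simp [PySem.Dict.keys_empty]), hfst]
  have hnd : dB.keys.Nodup := by
    rw [hdB, ← foldl_step_eq_two_pass]
    exact nodup_keys_foldl_step L _ PySem.Dict.nodup_keys_empty
  rw [hfst, hsnd,
    PySem.Dict.values_eq_map_keys dB hnd PySem.Dict.empty, List.map_map]
  rfl
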